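-- pv_equiv track=rewrite | github.com/RaghavRoy145/nhs-index-tool | src/nhsjobsearch/display.py | _highlight_match
-- ===== SOURCE A (Python) =====
-- def _highlight_match(text, query):
--     """Return list of (substring, is_highlighted) segments.
--     Finds all non-overlapping matches of query in text (case-insensitive)."""
--     if not query:
--         return [(text, False)]
--
--     query_lower = query.lower()
--     text_lower = text.lower()
--
--     segments = []
--     start = 0
--     while start < len(text):
--         match_pos = text_lower.find(query_lower, start)
--         if match_pos == -1:
--             segments.append((text[start:], False))
--             break
--         if match_pos > start:
--             segments.append((text[start:match_pos], False))
--         segments.append((text[match_pos:match_pos + len(query)], True))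
--         start = match_pos + len(query)
--
--     return segments if segments else [(text, False)]
-- ===== SOURCE B (Python) =====
-- def _highlight_match(text, query):
--     """Return list of (substring, is_highlighted) segments.
--     Finds all non-overlapping matches of query in text (case-insensitive)."""
--     if not query:
--         return [(text, False)]
--
--     def segs(t):
--         i = t.lower().find(query.lower())
--         if i == -1:
--             return [(t, False)] if t else []
--         pre = [(t[:i], False)] if i else []
--         return pre + [(t[i:i + len(query)], True)] + segs(t[i + len(query):])
--
--     return segs(text) or [(text, False)]
-- ===== Notes on version B (the rewrite author's own statement) =====
-- stated objective: simpler
-- what changed: A's imperative while-loop over an index into the fixed string with a segments accumulator is replaced by a direct recursion on the remaining suffix that returns its segments by concatenation, with the empty-result fallback written as 'segs(text) or [(text, False)]'.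
import Mathlib
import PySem

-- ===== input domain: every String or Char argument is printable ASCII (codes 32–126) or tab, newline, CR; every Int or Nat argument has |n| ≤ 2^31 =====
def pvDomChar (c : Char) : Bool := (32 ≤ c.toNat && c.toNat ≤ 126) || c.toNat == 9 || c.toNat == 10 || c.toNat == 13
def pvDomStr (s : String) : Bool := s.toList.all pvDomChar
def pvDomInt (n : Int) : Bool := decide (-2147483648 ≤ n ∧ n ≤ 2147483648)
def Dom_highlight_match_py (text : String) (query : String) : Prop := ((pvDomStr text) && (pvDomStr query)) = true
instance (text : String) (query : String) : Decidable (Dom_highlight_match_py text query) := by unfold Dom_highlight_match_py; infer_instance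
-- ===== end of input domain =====

-- B replaces A's index-accumulator while-loop by a direct recursion on the remaining suffix (simpler decomposition); return values proved equal on all inputs.


-- helper fact the port of A cites for its well-formedness argument
theorem length_lower (t : List Char) : (PySem.Chars.lower t).length = t.length := by
  simp [PySem.Chars.lower]

-- ===== PORT A =====
-- A's while-loop: start is the current index into text; segments is the accumulator.
-- tl/ql are the precomputed text.lower()/query.lower(); the Prop parameters record
-- facts the call site guarantees (query nonempty, tl is text lowered) used only for termination.
def pvALoop (text ql tl : List Char) (qlen : Nat) (hq : 0 < qlen) (htl : tl.length = text.length)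
    (start : Nat) (segs : List (String × Bool)) : List (String × Bool) :=
  if hlt : start < text.length then
    let mp := PySem.Chars.findFrom tl ql (start : Int)
    if hmp : mp = -1 then
      segs ++ [(String.mk (text.drop start), false)]
    else
      let m := mp.toNat
      let segs1 := if start < m then segs ++ [(String.mk ((text.drop start).take (m - start)), false)] else segs
      pvALoop text ql tl qlen hq htl (m + qlen) (segs1 ++ [(String.mk ((text.drop m).take qlen), true)])
  else segs
termination_by text.length - start
decreasing_by
  have h1 := (PySem.Chars.findFrom_natCast_spec tl ql start (by omega) hmp).1
  omega

def highlight_match_py (text : String) (query : String) : List (String × Bool) :=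
  if h : query.toList = [] then [(text, false)]
  else
    let segments := pvALoop text.toList (PySem.Chars.lower query.toList)
      (PySem.Chars.lower text.toList) query.toList.length
      (List.length_pos_iff.mpr h) (length_lower text.toList) 0 []
    if segments = [] then [(text, false)] else segments

-- ===== PORT B =====
-- B's recursion on the remaining suffix t (hq is used only for termination).
def pvBSegs (query : List Char) (hq : query ≠ []) (t : List Char) : List (String × Bool) :=
  let i := PySem.Chars.find (PySem.Chars.lower t) (PySem.Chars.lower query)
  if hi : i = -1 then
    if t = [] then [] else [(String.mk t, false)]
  else
    (if 0 < i.toNat then [(String.mk (t.take i.toNat), false)] else []) ++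
      (String.mk ((t.drop i.toNat).take query.length), true) ::
        pvBSegs query hq ((t.drop i.toNat).drop query.length)
termination_by t.length
decreasing_by
  have hinf : PySem.Chars.lower query <:+: PySem.Chars.lower t :=
    (PySem.Chars.find_ne_neg_one_iff _ _).mp hi
  have hlen := hinf.length_le
  have hql : (PySem.Chars.lower query).length = query.length := by simp [PySem.Chars.lower]
  have htl : (PySem.Chars.lower t).length = t.length := by simp [PySem.Chars.lower]
  have hq' : 0 < query.length := List.length_pos_iff.mpr hq
  simp only [List.length_drop]
  omega

def highlight_match_py_alt (text : String) (query : String) : List (String × Bool) :=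
  if h : query.toList = [] then [(text, false)]
  else
    let s := pvBSegs query.toList h text.toList
    if s = [] then [(text, false)] else s

-- ===== PRECONDITION & SPEC =====
def Spec_highlight_match_py (text : String) (query : String) (out : List (String × Bool)) : Prop := out = highlight_match_py_alt text query
instance (text : String) (query : String) (out : List (String × Bool)) : Decidable (Spec_highlight_match_py text query out) := by unfold Spec_highlight_match_py; infer_instance

-- ===== CLAIM (what is proved, stated in full; the proofs are below) =====
def Claim_equal_highlight_match_py : Prop := ∀ (text : String) (query : String), Dom_highlight_match_py text query → Spec_highlight_match_py text query (highlight_match_py text query)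

-- ===== LEMMAS AND PROOFS =====

theorem lower_drop (t : List Char) (k : Nat) :
    PySem.Chars.lower (t.drop k) = (PySem.Chars.lower t).drop k := by
  simp [PySem.Chars.lower]


-- The loop of A, started at index `start`, appends exactly B's segments of the suffix.
theorem pvALoop_eq_pvBSegs (text query : List Char) (hq : query ≠ [])
    (hq' : 0 < query.length) (start : Nat) (segs : List (String × Bool)) :
    pvALoop text (PySem.Chars.lower query) (PySem.Chars.lower text) query.length hq'
        (length_lower text) start segs
      = segs ++ pvBSegs query hq (text.drop start) := by
  fun_induction pvALoop with
  | case1 start segs hlt mp hmp =>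
    -- no further match: A emits the tail; B's find on the suffix is -1 and the suffix is nonempty
    have hmp' : PySem.Chars.findFrom (PySem.Chars.lower text) (PySem.Chars.lower query)
        (start : Int) = -1 := hmp
    have hfr := PySem.Chars.findFrom_natCast (PySem.Chars.lower text) (PySem.Chars.lower query)
      start (by rw [length_lower]; omega)
    have hi : PySem.Chars.find (PySem.Chars.lower (text.drop start)) (PySem.Chars.lower query) = -1 := by
      rw [lower_drop]
      by_contra hc
      rw [hfr, if_neg hc] at hmp'
      have h0 : 0 ≤ PySem.Chars.find ((PySem.Chars.lower text).drop start) (PySem.Chars.lower query) :=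
        (PySem.Chars.find_nonneg_iff _ _).mpr ((PySem.Chars.find_ne_neg_one_iff _ _).mp hc)
      omega
    have hne : text.drop start ≠ [] := by
      intro he
      have := congrArg List.length he
      simp at this; omega
    rw [pvBSegs]
    simp [hi, hne]
  | case2 start segs hlt mp hmp m segs1 ih =>
    -- a match: mp = start + i, where i is the find on the suffix
    have hmp' : ¬ PySem.Chars.findFrom (PySem.Chars.lower text) (PySem.Chars.lower query)
        (start : Int) = -1 := hmp
    have htl := length_lower text
    have hfr := PySem.Chars.findFrom_natCast (PySem.Chars.lower text) (PySem.Chars.lower query)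
      start (by omega)
    have hil : PySem.Chars.find (PySem.Chars.lower (text.drop start)) (PySem.Chars.lower query)
        = PySem.Chars.find ((PySem.Chars.lower text).drop start) (PySem.Chars.lower query) :=
      by rw [lower_drop]
    set i := PySem.Chars.find ((PySem.Chars.lower text).drop start) (PySem.Chars.lower query) with hidef
    have hnone : ¬ i = -1 := by
      intro hc; apply hmp'; rw [hfr, if_pos hc]
    have hipos : 0 ≤ i :=
      (PySem.Chars.find_nonneg_iff _ _).mpr ((PySem.Chars.find_ne_neg_one_iff _ _).mp hnone)
    have hmpval : mp = (start : Int) + i := by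
      show PySem.Chars.findFrom _ _ _ = _
      rw [hfr, if_neg hnone]
    have hmval : m = start + i.toNat := by
      show mp.toNat = _
      rw [hmpval]; omega
    have hpref := (PySem.Chars.findFrom_natCast_spec (PySem.Chars.lower text)
      (PySem.Chars.lower query) start (by omega) hmp').2.1
    have hdd : (text.drop start).drop i.toNat = text.drop m := by
      rw [List.drop_drop, hmval]
    have hddd : (text.drop m).drop query.length = text.drop (m + query.length) := by
      rw [List.drop_drop]
    have hseg1 : segs1 = if 0 < i.toNat then
        segs ++ [(String.mk ((text.drop start).take i.toNat), false)] else segs := by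
      show (if start < m then _ else _) = _
      by_cases hz : 0 < i.toNat
      · rw [if_pos (by omega), if_pos hz]
        have hms : m - start = i.toNat := by omega
        rw [hms]
      · rw [if_neg (by omega), if_neg hz]
    rw [pvBSegs]
    simp only [hil]
    rw [ih, hseg1, dif_neg hnone, hdd, hddd]
    by_cases hz : 0 < i.toNat
    · rw [if_pos hz, if_pos hz]; simp
    · rw [if_neg hz, if_neg hz]; simp
  | case3 start segs hlt =>
    rw [pvBSegs]
    have hdrop : text.drop start = [] := List.drop_eq_nil_of_le (by omega)
    rw [hdrop]
    have : PySem.Chars.find (PySem.Chars.lower []) (PySem.Chars.lower query) = -1 := by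
      rw [PySem.Chars.find_eq_neg_one_iff]
      simp [PySem.Chars.lower, hq]
    simp [this]

-- ===== VERDICT (by name: the statement is the Claim_ definition above) =====
theorem highlight_match_py_spec : Claim_equal_highlight_match_py := by
  unfold Claim_equal_highlight_match_py Spec_highlight_match_py
  intro text query _
  unfold highlight_match_py highlight_match_py_alt
  by_cases h : query.toList = []
  · simp [h]
  · simp only [dif_neg h]
    rw [pvALoop_eq_pvBSegs text.toList query.toList h (List.length_pos_iff.mpr h) 0 []]
    simp
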